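-- pv_equiv track=rewrite | github.com/co2meal/-bnpy-dev | bnpy/allocmodel/tree/HMTUtil.py | find_last_nonleaf_node
-- ===== SOURCE A (Python) =====
-- def find_last_nonleaf_node(N):
-- 	'''Get the index of last nonleaf node in the data
-- 	'''
-- 	if N == 1:
-- 		return None
-- 	else:
-- 		height = 1
-- 		total = 1
-- 		while (total + 4**height) < N:
-- 			total += 4**height
-- 			height += 1
-- 		return total
-- ===== SOURCE B (Python) =====
-- def find_last_nonleaf_node(N):
--     '''Get the index of last nonleaf node in the data
--     '''
--     if N == 1:
--         return None
--     X = 3 * N + 1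
--     bl = (X - 1).bit_length() if X > 1 else 0
--     m = max((bl + 1) // 2, 2)
--     return (4 ** (m - 1) - 1) // 3
-- ===== Notes on version B (the rewrite author's own statement) =====
-- stated objective: alternative
-- what changed: Replaced A's incremental geometric-series accumulation loop with a loop-free closed form: compute the least m with 4**m >= 3N+1 from the bit length of 3N, clamp m to at least 2, and return (4**(m-1)-1)//3.
import Mathlib
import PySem

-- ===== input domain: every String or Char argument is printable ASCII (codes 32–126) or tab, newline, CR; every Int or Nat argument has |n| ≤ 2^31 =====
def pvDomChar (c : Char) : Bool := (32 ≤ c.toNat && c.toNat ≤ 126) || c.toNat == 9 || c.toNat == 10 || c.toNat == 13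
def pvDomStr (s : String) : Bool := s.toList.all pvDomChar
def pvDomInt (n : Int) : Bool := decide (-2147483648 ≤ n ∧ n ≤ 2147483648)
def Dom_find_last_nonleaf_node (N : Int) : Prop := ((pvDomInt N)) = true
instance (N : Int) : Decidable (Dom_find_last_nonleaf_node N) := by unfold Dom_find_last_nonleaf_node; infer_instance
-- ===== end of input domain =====

-- B replaces A's geometric-series accumulation loop by a loop-free closed-form index
-- computation from the bit length of 3*N (objective: alternative, constant-time arithmetic).

-- ===== PORT A =====
-- A's while loop: while total + 4**height < N: total += 4**height; height += 1
def pvLoopA (N total : Int) (height : Nat) : Int :=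
  if total + 4 ^ height < N then pvLoopA N (total + 4 ^ height) (height + 1) else total
termination_by (N - total).toNat
decreasing_by
  have h4 : (0:Int) < 4 ^ height := by positivity
  omega

def find_last_nonleaf_node (N : Int) : Option Int :=
  if N = 1 then none
  else some (pvLoopA N 1 1)

-- ===== PORT B =====
def find_last_nonleaf_node_alt (N : Int) : Option Int :=
  if N = 1 then none
  else
    let X : Int := 3 * N + 1
    let bl : Nat := if 1 < X then PySem.Int.bitLength (X - 1) else 0
    let m : Nat := max ((bl + 1) / 2) 2
    some (PySem.Int.floordiv (4 ^ (m - 1) - 1) 3)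

-- ===== PRECONDITION & SPEC =====
def Spec_find_last_nonleaf_node (N : Int) (out : Option Int) : Prop := out = find_last_nonleaf_node_alt N
instance (N : Int) (out : Option Int) : Decidable (Spec_find_last_nonleaf_node N out) := by unfold Spec_find_last_nonleaf_node; infer_instance

-- ===== CLAIM (what is proved, stated in full; the proofs are below) =====
def Claim_equal_find_last_nonleaf_node : Prop := ∀ (N : Int), Dom_find_last_nonleaf_node N → Spec_find_last_nonleaf_node N (find_last_nonleaf_node N)

-- ===== LEMMAS AND PROOFS =====

-- A's loop under the invariant 3*total + 1 = 4^height: when m is the least exponent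
-- with 4^m ≥ 3N+1, the loop returns the total with 3*total + 1 = 4^(m-1).
lemma pvLoopA_eq (N : Int) (m : Nat)
    (hm4 : 3 * N + 1 ≤ (4:Int) ^ m)
    (hmin : ∀ k, k < m → (4:Int) ^ k < 3 * N + 1) :
    ∀ (total : Int) (height : Nat), 3 * total + 1 = 4 ^ height →
      (4:Int) ^ height < 3 * N + 1 →
      3 * pvLoopA N total height + 1 = 4 ^ (m - 1) := by
  refine pvLoopA.induct N
    (fun total height => 3 * total + 1 = 4 ^ height → (4:Int) ^ height < 3 * N + 1 →
      3 * pvLoopA N total height + 1 = 4 ^ (m - 1)) ?_ ?_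
  · intro total height hc ih hinv hlt
    have hpow : (4:Int) ^ (height + 1) = 4 * 4 ^ height := by ring
    rw [pvLoopA, if_pos hc]
    exact ih (by omega) (by omega)
  · intro total height hc hinv hlt
    have hpow : (4:Int) ^ (height + 1) = 4 * 4 ^ height := by ring
    have hstop : 3 * N + 1 ≤ (4:Int) ^ (height + 1) := by omega
    have h1 : height < m := by
      by_contra h
      have := pow_le_pow_right₀ (by norm_num : (1:Int) ≤ 4) (not_lt.mp h)
      omega
    have h2 : ¬ (height + 1 < m) := fun h => by have := hmin _ h; omega
    have hm : m = height + 1 := by omega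
    rw [pvLoopA, if_neg hc, hm]
    simpa using hinv

theorem find_last_nonleaf_node_spec : Claim_equal_find_last_nonleaf_node := by
  intro N _
  unfold Spec_find_last_nonleaf_node find_last_nonleaf_node find_last_nonleaf_node_alt
  by_cases hN1 : N = 1
  · simp [hN1]
  rw [if_neg hN1, if_neg hN1]
  by_cases hN0 : N ≤ 0
  · -- degenerate N: A's loop exits immediately with total = 1; B clamps m to 2
    have hX : ¬ (1 < 3 * N + 1) := by omega
    rw [pvLoopA, if_neg (by norm_num; omega)]
    simp only [if_neg hX]
    norm_num [PySem.Int.floordiv]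
  · -- main case: N ≥ 2
    have hN2 : 2 ≤ N := by omega
    have hX1 : (1:Int) < 3 * N + 1 := by omega
    simp only [if_pos hX1]
    set bl : Nat := PySem.Int.bitLength (3 * N + 1 - 1) with hbl
    -- bracket the bit length: 2^(bl-1) ≤ 3N < 2^bl
    have hne : (3 * N + 1 - 1) ≠ 0 := by omega
    have hub : (3 * N + 1 - 1).natAbs < 2 ^ bl := PySem.Int.lt_two_pow_bitLength _
    have hlb : 2 ^ (bl - 1) ≤ (3 * N + 1 - 1).natAbs := PySem.Int.two_pow_bitLength_le _ hne
    have habs : ((3 * N + 1 - 1).natAbs : Int) = 3 * N := by omega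
    have hubZ : 3 * N < (2:Int) ^ bl := by
      have h2 : (((3 * N + 1 - 1).natAbs) : Int) < (((2:Nat) ^ bl : Nat) : Int) := by exact_mod_cast hub
      rw [habs] at h2
      push_cast at h2
      omega
    have hlbZ : (2:Int) ^ (bl - 1) ≤ 3 * N := by
      have h2 : (((2:Nat) ^ (bl - 1) : Nat) : Int) ≤ (((3 * N + 1 - 1).natAbs) : Int) := by exact_mod_cast hlb
      rw [habs] at h2
      push_cast at h2
      omega
    have hbl3 : 3 ≤ bl := by
      by_contra h
      have hble : bl ≤ 2 := by omega
      have : (2:Int) ^ bl ≤ 2 ^ 2 := pow_le_pow_right₀ (by norm_num) hble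
      norm_num at this
      omega
    have hmmax : max ((bl + 1) / 2) 2 = (bl + 1) / 2 := by omega
    rw [hmmax]
    set m : Nat := (bl + 1) / 2 with hm
    have h2m : bl ≤ 2 * m ∧ 2 * m ≤ bl + 1 := by omega
    -- least-exponent facts for m
    have hm4 : 3 * N + 1 ≤ (4:Int) ^ m := by
      have h1 : (4:Int) ^ m = 2 ^ (2 * m) := by
        rw [show (4:Int) = 2 ^ 2 by norm_num, ← pow_mul, Nat.mul_comm]
      have h2 : (2:Int) ^ bl ≤ 2 ^ (2 * m) := pow_le_pow_right₀ (by norm_num) h2m.1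
      omega
    have hmin : ∀ k, k < m → (4:Int) ^ k < 3 * N + 1 := by
      intro k hk
      have h1 : (4:Int) ^ k = 2 ^ (2 * k) := by
        rw [show (4:Int) = 2 ^ 2 by norm_num, ← pow_mul, Nat.mul_comm]
      have hkb : 2 * k ≤ bl - 1 := by omega
      have h2 : (2:Int) ^ (2 * k) ≤ 2 ^ (bl - 1) := pow_le_pow_right₀ (by norm_num) hkb
      omega
    have h41 : (4:Int) ^ 1 < 3 * N + 1 := by norm_num; omega
    have hloop := pvLoopA_eq N m hm4 hmin 1 1 (by norm_num) h41
    have hdiv : PySem.Int.floordiv ((4:Int) ^ (m - 1) - 1) 3 = pvLoopA N 1 1 := by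
      rw [PySem.Int.floordiv_eq_ediv_of_pos (by norm_num)]
      have : (4:Int) ^ (m - 1) - 1 = 3 * pvLoopA N 1 1 := by omega
      rw [this, Int.mul_ediv_cancel_left _ (by norm_num)]
    rw [hdiv]
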